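-- pv_equiv track=rewrite | github.com/bashish101/variations | multigrid.py | full_multigrid
-- ===== SOURCE A (Python) =====
-- def get_cycle(choice, depth = 3):
--     # choice \in [0, depth - 1]
--     down = 2 ** (depth - choice)
--     up = 2 ** (depth - (choice + 1))
--     if choice  == 0:
--         # Full-size, w0
--         return [up, down, up]
--     elif choice < depth:
--         inner = get_cycle(choice - 1)
--
--         start = [up, down]
--         mid = concat(inner, inner)
--         end = [down, up]
--         return concat(concat(start, mid), end)
--     else:
--         return []
--
-- def concat(cycle1, cycle2):
--     if len(cycle1) > 0 and len(cycle2) > 0: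
--         if cycle1[-1] == cycle2[0]:
--             return cycle1 + cycle2[1:]
--         # Refinement step
--         return cycle1 + cycle2
--     else:
--         return cycle1 + cycle2
--
-- def full_multigrid(cycles = 2, depth = 3):
--     start =  2 ** depth
--     full_cycle = [start]
--     for index in range(depth):
--         w = get_cycle(index)
--         sub_cycle = concat(w, w)
--         full_cycle = concat(full_cycle, sub_cycle)
--
--     grid_steps = []
--     for _ in range(cycles):
--         grid_steps = concat(grid_steps, full_cycle)
--
--     return grid_steps
-- ===== SOURCE B (Python) =====
-- def _join(acc, seg):
--     # append seg to acc in place, skipping seg's first element when it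
--     # duplicates the running last element
--     if acc and seg and acc[-1] == seg[0]:
--         acc.extend(seg[1:])
--     else:
--         acc.extend(seg)
--
-- def _cycle(choice):
--     # iterative bottom-up build of the w-cycle (A recurses top-down);
--     # get_cycle always uses its default depth 3, so choices >= 3 are empty
--     if choice >= 3:
--         return []
--     c = [4, 8, 4]
--     for k in range(1, choice + 1):
--         up = 2 ** (3 - (k + 1))
--         down = 2 ** (3 - k)
--         nxt = [up, down]
--         for seg in (c, c, [down, up]):
--             _join(nxt, seg)
--         c = nxt
--     return c
--
-- def full_multigrid(cycles=2, depth=3):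
--     full = [2 ** depth]
--     for index in range(depth):
--         w = _cycle(index)
--         _join(full, w)
--         _join(full, w)
--     if cycles <= 0:
--         return []
--     tail = full[1:] if full[0] == full[-1] else list(full)
--     return full + tail * (cycles - 1)
-- ===== Notes on version B (the rewrite author's own statement) =====
-- stated objective: faster
-- what changed: B replaces A's cycles-loop of repeated quadratic list copies by a closed replication formula (full_cycle ++ tail*(cycles-1), dropping the duplicated boundary element once), and builds the w-cycles iteratively bottom-up with an in-place extend/dedup join instead of get_cycle's top-down recursion with repeated concat copies.
-- outside the precondition, e.g. on full_multigrid(2, -1): A returns [0.5], B returns [0.5]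
import Mathlib
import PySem

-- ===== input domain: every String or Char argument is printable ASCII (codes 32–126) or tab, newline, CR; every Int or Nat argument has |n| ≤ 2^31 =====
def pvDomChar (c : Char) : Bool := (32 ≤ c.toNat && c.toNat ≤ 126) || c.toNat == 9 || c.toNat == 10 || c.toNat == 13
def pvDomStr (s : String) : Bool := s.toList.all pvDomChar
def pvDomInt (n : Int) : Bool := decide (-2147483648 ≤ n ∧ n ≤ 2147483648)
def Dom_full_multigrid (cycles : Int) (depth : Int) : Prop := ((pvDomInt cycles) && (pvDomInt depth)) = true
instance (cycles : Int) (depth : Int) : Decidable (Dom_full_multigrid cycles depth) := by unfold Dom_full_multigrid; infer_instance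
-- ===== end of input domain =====

-- B replaces A's quadratic cycles-loop of repeated list copies by one closed replication
-- (full_cycle ++ tail*(cycles-1)) and builds the w-cycles iteratively bottom-up instead of
-- by get_cycle's recursion; objective: faster (linear in the output instead of quadratic copying).

-- ===== PORT A =====
-- concat: `cycle1[-1]`/`cycle2[0]` are taken only in the both-nonempty branch, where
-- getLast?/head? are exactly Python's indexing; `cycle2[1:]` = drop 1.
def concatA (c1 c2 : List Int) : List Int :=
  if c1.length > 0 ∧ c2.length > 0 then
    if c1.getLast? = c2.head? then c1 ++ c2.drop 1 else c1 ++ c2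
  else c1 ++ c2

-- get_cycle: fuel (= choice.toNat + 1) only makes the recursion total; it is never exhausted
-- on the calls full_multigrid makes (choice = 0..depth-1 ≥ 0, recursion stops at 0 or at 3).
-- `2 ** e` is ported as `2 ^ e.toNat`: in every branch whose value is USED the exponent is ≥ 0.
def get_cycleA : Nat → Int → Int → List Int
  | 0, _, _ => []
  | fuel + 1, choice, depth =>
    let down : Int := 2 ^ (depth - choice).toNat
    let up : Int := 2 ^ (depth - (choice + 1)).toNat
    if choice = 0 then [up, down, up]
    else if choice < depth then
      let inner := get_cycleA fuel (choice - 1) depth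
      concatA (concatA [up, down] (concatA inner inner)) [down, up]
    else []

-- `2 ** depth` ported as `2 ^ depth.toNat`: Pre_ requires 0 ≤ depth when cycles > 0
-- (Python produces a float list otherwise); for cycles ≤ 0 the value is unused ([] returned).
def full_multigrid (cycles : Int) (depth : Int) : List Int :=
  let start : Int := 2 ^ depth.toNat
  let full_cycle := (PySem.List.pyRange 0 depth 1).foldl
    (fun fc index =>
      let w := get_cycleA (index.toNat + 1) index 3
      concatA fc (concatA w w)) [start]
  (PySem.List.pyRange 0 cycles 1).foldl (fun gs _ => concatA gs full_cycle) []

-- ===== PORT B =====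
def joinB (acc seg : List Int) : List Int :=
  if acc ≠ [] ∧ seg ≠ [] ∧ acc.getLast? = seg.head? then acc ++ seg.drop 1 else acc ++ seg

def cycleB (choice : Int) : List Int :=
  if choice ≥ 3 then []
  else (PySem.List.pyRange 1 (choice + 1) 1).foldl
    (fun c k =>
      let up : Int := 2 ^ (3 - (k + 1)).toNat
      let down : Int := 2 ^ (3 - k).toNat
      joinB (joinB (joinB [up, down] c) c) [down, up]) [4, 8, 4]

def full_multigrid_alt (cycles : Int) (depth : Int) : List Int :=
  let full := (PySem.List.pyRange 0 depth 1).foldl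
    (fun fc index =>
      let w := cycleB index
      joinB (joinB fc w) w) [(2 : Int) ^ depth.toNat]
  if cycles ≤ 0 then []
  else
    let tail := if full.head? = full.getLast? then full.drop 1 else full
    full ++ (List.replicate (cycles - 1).toNat tail).flatten

-- ===== PRECONDITION & SPEC =====
-- Pre_ excludes depth < 0 together with cycles > 0: there Python's `2 ** depth` is a float and
-- A returns a list containing a float, which is not a value of the declared type list[int].
def Pre_full_multigrid (cycles : Int) (depth : Int) : Prop := 0 ≤ depth ∨ cycles ≤ 0
instance (cycles : Int) (depth : Int) : Decidable (Pre_full_multigrid cycles depth) := by unfold Pre_full_multigrid; infer_instance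
def pvWitness_full_multigrid : Int × Int := (2, 3)

def Spec_full_multigrid (cycles : Int) (depth : Int) (out : List Int) : Prop := out = full_multigrid_alt cycles depth
instance (cycles : Int) (depth : Int) (out : List Int) : Decidable (Spec_full_multigrid cycles depth out) := by unfold Spec_full_multigrid; infer_instance

-- ===== CLAIM (what is proved, stated in full; the proofs are below) =====
def Claim_equal_full_multigrid : Prop := ∀ (cycles : Int) (depth : Int), Dom_full_multigrid cycles depth → Pre_full_multigrid cycles depth → Spec_full_multigrid cycles depth (full_multigrid cycles depth)

-- ===== LEMMAS AND PROOFS =====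

-- B's in-place join computes the same value as A's concat.
theorem joinB_eq_concatA (a b : List Int) : joinB a b = concatA a b := by
  unfold joinB concatA
  rcases a with _ | ⟨x, xs⟩ <;> rcases b with _ | ⟨y, ys⟩ <;> simp

theorem concatA_ne_nil (a b : List Int) (ha : a ≠ []) : concatA a b ≠ [] := by
  unfold concatA; split_ifs <;> simp [ha]

theorem concatA_cons (a : List Int) (y : Int) (ys : List Int) :
    concatA a (y :: ys) = a ++ (if a.getLast? = some y then ys else y :: ys) := by
  unfold concatA
  rcases a with _ | ⟨x, xs⟩ <;> simp <;> split_ifs <;> simp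

theorem getLast?_or_of_ne_nil (l : List Int) (h : l ≠ []) (o : Option Int) :
    l.getLast?.or o = l.getLast? := by
  obtain ⟨w, hw⟩ := Option.isSome_iff_exists.mp (List.getLast?_isSome.mpr h)
  simp [hw]

theorem getLast?_append_concat (a : List Int) (y : Int) (ys : List Int) :
    (a ++ (if a.getLast? = some y then ys else y :: ys)).getLast? = (y :: ys).getLast? := by
  split_ifs with h
  · rcases ys with _ | ⟨z, zs⟩
    · simpa using h
    · simp [List.getLast?_append, getLast?_or_of_ne_nil]
  · simp [List.getLast?_append, getLast?_or_of_ne_nil]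

-- associativity of the dedup-concat
theorem concatA_assoc (a b c : List Int) :
    concatA (concatA a b) c = concatA a (concatA b c) := by
  rcases b with _ | ⟨y, ys⟩
  · simp [concatA]
  rcases c with _ | ⟨z, zs⟩
  · unfold concatA; split_ifs <;> simp_all
  rw [concatA_cons a y ys, concatA_cons (a ++ _) z zs]
  rw [getLast?_append_concat]
  rw [show concatA (y :: ys) (z :: zs) = (y :: ys) ++ (if (y::ys).getLast? = some z then zs else z :: zs) from concatA_cons _ z zs]
  rw [show (y :: ys) ++ (if (y::ys).getLast? = some z then zs else z :: zs) = y :: (ys ++ (if (y::ys).getLast? = some z then zs else z :: zs)) from rfl]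
  rw [concatA_cons a y _]
  split_ifs <;> simp

-- B's iterative cycle builder equals A's recursive get_cycle on the calls made
theorem cycleB_eq (i : Int) (hi : 0 ≤ i) :
    cycleB i = get_cycleA (i.toNat + 1) i 3 := by
  by_cases h3 : 3 ≤ i
  · rw [cycleB, if_pos h3, get_cycleA]
    simp only []
    rw [if_neg (by omega), if_neg (by omega)]
  · interval_cases i <;> decide

-- the two full_cycle computations agree
theorem full_cycle_eq (depth : Int) (init : List Int) :
    (PySem.List.pyRange 0 depth 1).foldl
      (fun fc index => joinB (joinB fc (cycleB index)) (cycleB index)) init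
    = (PySem.List.pyRange 0 depth 1).foldl
      (fun fc index =>
        concatA fc (concatA (get_cycleA (index.toNat + 1) index 3) (get_cycleA (index.toNat + 1) index 3))) init := by
  apply PySem.List.foldl_congr_mem
  intro acc x hx
  have hx0 : 0 ≤ x := ((PySem.List.mem_pyRange_one).mp hx).1
  rw [joinB_eq_concatA, joinB_eq_concatA, cycleB_eq x hx0, concatA_assoc]

theorem foldl_concatA_ne_nil (g : Int → List Int) (L : List Int) :
    ∀ init : List Int, init ≠ [] →
      L.foldl (fun fc x => concatA fc (g x)) init ≠ [] := by
  induction L with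
  | nil => intro init h; simpa using h
  | cons x xs ih =>
    intro init h
    exact ih _ (concatA_ne_nil _ _ h)

-- last element of fc ++ (k copies of tail) is fc's last
theorem rep_last (h : Int) (t : List Int) (tl : List Int)
    (htl : tl = if (h :: t).head? = (h :: t).getLast? then t else h :: t) (k : Nat) :
    ((h :: t) ++ (List.replicate k tl).flatten).getLast? = (h :: t).getLast? := by
  induction k with
  | zero => simp
  | succ m ih =>
    rw [List.replicate_succ', List.flatten_append, ← List.append_assoc]
    rcases hc : tl with _ | ⟨u, us⟩
    · simpa [hc] using ih
    · simp only [List.flatten_cons, List.flatten_nil, List.append_nil]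
      rw [List.getLast?_append (l' := u :: us), getLast?_or_of_ne_nil _ (by simp)]
      subst htl
      split_ifs at hc with hd
      · rcases t with _ | ⟨v, vs⟩
        · simp at hc
        · rw [← hc]
          simp [List.getLast?_cons_cons]
      · rw [← hc]

-- the replication closed form for A's cycles loop
set_option maxRecDepth 10000 in
theorem repl_eq (fc : List Int) (hfc : fc ≠ []) (n : Nat) :
    (List.range n).foldl (fun gs _ => concatA gs fc) [] =
      (if n = 0 then [] else
        fc ++ (List.replicate (n - 1) (if fc.head? = fc.getLast? then fc.drop 1 else fc)).flatten) := by
  induction n with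
  | zero => simp
  | succ m ih =>
    rw [List.range_succ, List.foldl_append, ih]
    rcases fc with _ | ⟨h, t⟩
    · exact absurd rfl hfc
    simp only [List.drop_succ_cons, List.drop_zero]
    rcases m with _ | m
    · simp only [reduceIte, List.foldl_cons, List.foldl_nil, Nat.add_sub_cancel,
        List.replicate_zero, List.flatten_nil, List.append_nil]
      simp [concatA]
    · simp only [Nat.succ_ne_zero, if_false, Nat.add_sub_cancel, List.foldl_cons, List.foldl_nil]
      rw [concatA_cons, rep_last h t _ rfl]
      have hifs : (if (h :: t).getLast? = some h then t else h :: t)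
          = (if (h :: t).head? = (h :: t).getLast? then t else h :: t) := by
        by_cases hcnd : (h :: t).getLast? = some h
        · simp [hcnd]
        · have h2 : ¬ (some h = (h :: t).getLast?) := fun e => hcnd e.symm
          simp [hcnd, h2]
      rw [hifs, List.replicate_succ', List.flatten_append]
      simp [List.append_assoc]

-- ===== VERDICT (by name: the statement is the Claim_ definition above) =====
theorem full_multigrid_spec : Claim_equal_full_multigrid := by
  intro cycles depth _ _
  unfold Spec_full_multigrid full_multigrid full_multigrid_alt
  simp only []
  rw [full_cycle_eq]
  set fc := (PySem.List.pyRange 0 depth 1).foldl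
    (fun fci index =>
      concatA fci (concatA (get_cycleA (index.toNat + 1) index 3) (get_cycleA (index.toNat + 1) index 3)))
    [(2 : Int) ^ depth.toNat] with hfc
  have hne : fc ≠ [] := foldl_concatA_ne_nil _ _ _ (by simp)
  rw [PySem.List.pyRange_one, List.foldl_map, repl_eq fc hne]
  by_cases hc : cycles ≤ 0
  · rw [if_pos hc, if_pos (by omega : (cycles - 0).toNat = 0)]
  · rw [if_neg hc, if_neg (by omega : ¬ (cycles - 0).toNat = 0)]
    have h1 : (cycles - 0).toNat - 1 = (cycles - 1).toNat := by omega
    rw [h1]
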